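-- pv_equiv track=rewrite | github.com/BenWarwick-Champion/adventofcode | 2023/python-solutions/src/day03.py | part_number_from_row
-- ===== SOURCE A (Python) =====
-- def part_number_from_row(row: list[str]):
--     part_numbers = []
--     curr_num = []
--     for ind, char in enumerate(row):
--         if char.isdigit():
--             curr_num.append(char)
--             if ind == len(row) - 1:
--                 part_numbers.append(int(''.join(curr_num)))
--                 curr_num = []
--         elif len(curr_num) > 0:
--             part_numbers.append(int(''.join(curr_num)))
--             curr_num = []
--         else:
--             continue
--     return part_numbers
-- ===== SOURCE B (Python) =====
-- def part_number_from_row(row: list[str]):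
--     nums = []
--     i, n = 0, len(row)
--     while i < n:
--         if row[i].isdigit():
--             j = i
--             while j < n and row[j].isdigit():
--                 j += 1
--             nums.append(int(''.join(row[i:j])))
--             i = j
--         else:
--             i += 1
--     return nums
-- ===== Notes on version B (the rewrite author's own statement) =====
-- stated objective: simpler
-- what changed: Replaced A's enumerate loop with a pending-digits accumulator and a special 'last index' flush by a two-pointer run scanner: at each digit position an inner scan finds the end of the digit run, which is joined and converted in one step; no accumulator state and no end-of-list special case.
import Mathlib
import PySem

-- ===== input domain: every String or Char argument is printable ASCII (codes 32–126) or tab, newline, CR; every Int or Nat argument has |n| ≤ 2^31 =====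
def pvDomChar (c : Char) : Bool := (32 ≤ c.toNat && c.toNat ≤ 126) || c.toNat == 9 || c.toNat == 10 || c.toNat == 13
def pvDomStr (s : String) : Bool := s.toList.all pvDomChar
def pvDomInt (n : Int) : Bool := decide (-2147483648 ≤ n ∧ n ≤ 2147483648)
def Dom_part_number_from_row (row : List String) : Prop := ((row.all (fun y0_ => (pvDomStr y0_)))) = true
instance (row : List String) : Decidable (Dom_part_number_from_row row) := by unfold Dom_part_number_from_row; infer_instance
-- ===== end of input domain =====

-- B replaces A's accumulator-with-last-index-flush loop by a two-pointer run scanner (simpler decomposition, same cost).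

-- int(''.join(l)): on every reachable call l is a nonempty list of digit-only strings, so Python never
-- raises here; the getD 0 default is never hit (both ports share this helper, so equality is unconditional anyway).
def pvParse (l : List String) : Int := (PySem.Int.ofStr? (PySem.Str.join "" l)).getD 0

-- ===== PORT A =====
-- A's loop body, one step of the fold (st = (part_numbers, curr_num), p = (ind, char))
def pvStepA (n : Int) (st : List Int × List String) (p : Int × String) : List Int × List String :=
  if PySem.Str.strIsdigit p.2 then
    let curr := st.2 ++ [p.2]
    if p.1 = n - 1 then (st.1 ++ [pvParse curr], [])
    else (st.1, curr)
  else if st.2.length > 0 then (st.1 ++ [pvParse st.2], [])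
  else st

def part_number_from_row (row : List String) : List Int :=
  (((PySem.List.enumerate row).foldl (pvStepA (row.length : Int)) ([], []))).1

-- ===== PORT B =====
-- Source B's outer while-loop: each digit position starts an inner scan (takeWhile = the inner 'while j < n'),
-- emits int(''.join(row[i:j])) and resumes after the run (dropWhile); nondigit positions are skipped.
def pvScanRuns (l : List String) : List Int :=
  match l with
  | [] => []
  | s :: rest =>
    if PySem.Str.strIsdigit s then
      pvParse (s :: rest.takeWhile PySem.Str.strIsdigit) ::
        pvScanRuns (rest.dropWhile PySem.Str.strIsdigit)
    else pvScanRuns rest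
termination_by l.length
decreasing_by
  · exact Nat.lt_succ_of_le (List.length_dropWhile_le _ _)
  · exact Nat.lt_succ_self _

def part_number_from_row_alt (row : List String) : List Int := pvScanRuns row

-- ===== PRECONDITION & SPEC =====
def Spec_part_number_from_row (row : List String) (out : List Int) : Prop := out = part_number_from_row_alt row
instance (row : List String) (out : List Int) : Decidable (Spec_part_number_from_row row out) := by unfold Spec_part_number_from_row; infer_instance

-- ===== CLAIM (what is proved, stated in full; the proofs are below) =====
def Claim_equal_part_number_from_row : Prop := ∀ (row : List String), Dom_part_number_from_row row → Spec_part_number_from_row row (part_number_from_row row)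

-- ===== LEMMAS AND PROOFS =====

-- index-free characterisation of A's loop
def pvARec (curr : List String) : List String → List Int
  | [] => []
  | s :: rest =>
    if PySem.Str.strIsdigit s then
      if rest = [] then [pvParse (curr ++ [s])]
      else pvARec (curr ++ [s]) rest
    else if curr = [] then pvARec [] rest
    else pvParse curr :: pvARec [] rest

-- A's fold over enumerate equals pvARec (the index test 'ind = n-1' ↔ the suffix is a singleton)
theorem pvFoldA (n : Int) (l : List String) (i : Int) (acc : List Int) (curr : List String)
    (h : i + l.length = n) :
    ((PySem.List.enumerate l i).foldl (pvStepA n) (acc, curr)).1 = acc ++ pvARec curr l := by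
  induction l generalizing i acc curr with
  | nil => simp [PySem.List.enumerate_nil, pvARec]
  | cons s rest ih =>
    rw [PySem.List.enumerate_cons, List.foldl_cons]
    by_cases hd : PySem.Str.strIsdigit s
    all_goals simp only [PySem.Str.strIsdigit_eq] at hd
    · by_cases hr : rest = []
      · subst hr
        simp at h
        have hi : i = n - 1 := by omega
        have hstep : pvStepA n (acc, curr) (i, s) = (acc ++ [pvParse (curr ++ [s])], []) := by
          simp [pvStepA, hd, hi]
        rw [hstep, PySem.List.enumerate_nil, List.foldl_nil]
        simp [pvARec, hd]
      · have hi : ¬ (i = n - 1) := by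
          have : 0 < rest.length := List.length_pos_of_ne_nil hr
          simp at h; omega
        have hstep : pvStepA n (acc, curr) (i, s) = (acc, curr ++ [s]) := by
          simp [pvStepA, hd, hi]
        rw [hstep, ih (i + 1) acc (curr ++ [s]) (by simp at h ⊢; omega)]
        simp [pvARec, hd, hr]
    · by_cases hc : curr = []
      · subst hc
        have hstep : pvStepA n (acc, []) (i, s) = (acc, []) := by
          simp [pvStepA, hd]
        rw [hstep, ih (i + 1) acc [] (by simp at h ⊢; omega)]
        simp [pvARec, hd]
      · have hlen : curr.length > 0 := List.length_pos_of_ne_nil hc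
        have hstep : pvStepA n (acc, curr) (i, s) = (acc ++ [pvParse curr], []) := by
          simp [pvStepA, hd, hlen]
        rw [hstep, ih (i + 1) (acc ++ [pvParse curr]) [] (by simp at h ⊢; omega)]
        simp [pvARec, hd, hc]

-- merging a pending digit prefix `curr` into B's run scan
def pvComb (curr l : List String) : List Int :=
  match l with
  | [] => []
  | s :: rest =>
    if PySem.Str.strIsdigit s then
      pvParse (curr ++ s :: rest.takeWhile PySem.Str.strIsdigit) ::
        pvScanRuns (rest.dropWhile PySem.Str.strIsdigit)
    else if curr = [] then pvScanRuns (s :: rest)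
    else pvParse curr :: pvScanRuns (s :: rest)

theorem pvComb_nil (l : List String) : pvComb [] l = pvScanRuns l := by
  cases l with
  | nil => simp [pvComb, pvScanRuns]
  | cons s rest =>
    by_cases hd : PySem.Str.strIsdigit s
    all_goals simp only [PySem.Str.strIsdigit_eq] at hd
    all_goals simp [pvComb, pvScanRuns, hd]

theorem pvARec_eq_comb (l : List String) : ∀ curr, pvARec curr l = pvComb curr l := by
  induction l with
  | nil => intro curr; simp [pvARec, pvComb]
  | cons s rest ih =>
    intro curr
    by_cases hd : PySem.Str.strIsdigit s
    · by_cases hr : rest = []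
      · subst hr
        simp only [PySem.Str.strIsdigit_eq] at hd
        simp [pvARec, pvComb, hd, pvScanRuns]
      · rw [pvARec, if_pos hd, if_neg hr, ih (curr ++ [s])]
        simp only [PySem.Str.strIsdigit_eq] at hd
        cases rest with
        | nil => exact absurd rfl hr
        | cons t rs =>
          by_cases ht : PySem.Str.strIsdigit t
          all_goals simp only [PySem.Str.strIsdigit_eq] at ht
          · simp [pvComb, hd, ht]
          · simp [pvComb, hd, ht, pvScanRuns]
    · by_cases hc : curr = []
      · subst hc
        rw [pvARec, if_neg hd, if_pos rfl, ih [], pvComb_nil, pvComb]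
        simp only [PySem.Str.strIsdigit_eq] at hd
        simp [pvScanRuns, hd]
      · rw [pvARec, if_neg hd, if_neg hc, ih [], pvComb_nil, pvComb]
        simp only [PySem.Str.strIsdigit_eq] at hd
        simp [pvScanRuns, hd, hc]

-- ===== VERDICT (by name: the statement is the Claim_ definition above) =====
theorem part_number_from_row_spec : Claim_equal_part_number_from_row := by
  intro row _
  show part_number_from_row row = part_number_from_row_alt row
  unfold part_number_from_row part_number_from_row_alt
  rw [pvFoldA (row.length : Int) row 0 [] [] (by simp)]
  rw [pvARec_eq_comb, pvComb_nil]
  simp
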